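-- pv_equiv track=rewrite | github.com/hogan-tech/leetcode-solution | 3928-split-and-merge-array-transformation/3928-split-and-merge-array-transformation.py | minSplitMerge
-- ===== SOURCE A (Python) =====
-- from typing import List
-- from collections import deque
--
-- def minSplitMerge(nums1: List[int], nums2: List[int]) -> int:
--     n = len(nums1)
--     target = tuple(nums2)
--     start = tuple(nums1)
--     if start == target:
--         return 0
--
--     visited = set()
--     queue = deque()
--     queue.append((start, 0))
--     visited.add(start)
--
--     while queue:
--         state, steps = queue.popleft()
--         arr = list(state)
--         if state == target:
--             return steps
--         for L in range(n):
--             for R in range(L, n):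
--                 sub = arr[L:R+1]
--                 left = arr[:L]
--                 right = arr[R+1:]
--                 remaining = left + right
--                 k = len(remaining)
--                 for pos in range(0, k+1):
--                     newArr = remaining[:pos] + sub + remaining[pos:]
--                     newState = tuple(newArr)
--                     if newState not in visited:
--                         visited.add(newState)
--                         queue.append((newState, steps+1))
--     return -1
-- ===== SOURCE B (Python) =====
-- from typing import List
--
--
-- def minSplitMerge(nums1: List[int], nums2: List[int]) -> int:
--     # Iterative deepening: depth-limited recursive DFS from nums1 with an
--     # increasing move budget, instead of a BFS queue with a visited set.
--     # Every move preserves the multiset, so infeasible pairs are rejected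
--     # up front; for feasible ones a shortest path visits pairwise distinct
--     # arrangements, hence its length is < n! and the deepening terminates.
--     if sorted(nums1) != sorted(nums2):
--         return -1
--     target = list(nums2)
--
--     def within(state: List[int], k: int) -> bool:
--         # True iff target is reachable from state in at most k moves.
--         if state == target:
--             return True
--         if k == 0:
--             return False
--         n = len(state)
--         for L in range(n):
--             for R in range(L, n):
--                 sub = state[L:R + 1]
--                 remaining = state[:L] + state[R + 1:]
--                 for pos in range(len(remaining) + 1):
--                     if within(remaining[:pos] + sub + remaining[pos:], k - 1):
--                         return True
--         return False
--
--     limit = 1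
--     for i in range(2, len(nums1) + 1):
--         limit *= i
--     start = list(nums1)
--     for d in range(limit):
--         if within(start, d):
--             return d
--     return -1
-- ===== Notes on version B (the rewrite author's own statement) =====
-- stated objective: alternative
-- what changed: Replaces A's BFS (FIFO queue of (state, steps) pairs plus a visited set) by iterative deepening: a recursive depth-limited DFS 'within(state, k)' called with an increasing move budget, with a sorted-multiset feasibility check up front; no queue and no visited set are maintained.
import Mathlib
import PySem

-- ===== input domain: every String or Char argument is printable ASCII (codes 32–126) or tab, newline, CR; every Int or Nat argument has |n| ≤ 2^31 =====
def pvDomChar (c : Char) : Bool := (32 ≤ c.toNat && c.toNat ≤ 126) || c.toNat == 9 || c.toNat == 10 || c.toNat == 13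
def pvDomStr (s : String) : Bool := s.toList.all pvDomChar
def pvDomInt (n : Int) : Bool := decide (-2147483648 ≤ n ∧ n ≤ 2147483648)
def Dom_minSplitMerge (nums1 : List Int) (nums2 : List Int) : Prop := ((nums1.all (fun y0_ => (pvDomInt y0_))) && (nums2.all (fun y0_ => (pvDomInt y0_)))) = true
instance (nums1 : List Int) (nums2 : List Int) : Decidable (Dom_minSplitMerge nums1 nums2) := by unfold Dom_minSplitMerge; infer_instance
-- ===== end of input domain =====

-- B replaces A's queue-and-visited-set BFS by iterative deepening (depth-limited recursive
-- DFS with an increasing move budget) behind a multiset feasibility check (objective: alternative).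

-- ===== PORT A =====
-- the inner triple loop of both Pythons: all arrays obtained from `arr` by cutting out a
-- contiguous block arr[L:R+1] and reinserting it at position pos of the remainder.
-- (A's Python writes range(n) with n = len(nums1); every state in its queue is a
-- rearrangement of nums1, so len(arr) = n there and arr.length is the same value.)
def pvNbrs (arr : List Int) : List (List Int) :=
  (List.range arr.length).flatMap (fun L =>
    (List.range' L (arr.length - L)).flatMap (fun R =>
      let sub := (arr.drop L).take (R + 1 - L)
      let remaining := arr.take L ++ arr.drop (R + 1)
      (List.range (remaining.length + 1)).map (fun pos =>
        remaining.take pos ++ sub ++ remaining.drop pos)))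

-- A's BFS loop: queue of (state, steps) pairs, visited marked on push, target tested on pop.
-- The fuel only makes the recursion structural; it is proved sufficient below.
def bfsA (target : List Int) : Nat → List (List Int × Int) → PySem.Set (List Int) → Int
  | _, [], _ => -1
  | 0, _ :: _, _ => -1
  | fuel + 1, (state, steps) :: rest, visited =>
    if state = target then steps
    else
      let p := (pvNbrs state).foldl
        (fun (p : List (List Int × Int) × PySem.Set (List Int)) t =>
          if t ∈ p.2 then p else (p.1 ++ [(t, steps + 1)], PySem.Set.add p.2 t))
        (rest, visited)
      bfsA target fuel p.1 p.2

def minSplitMerge (nums1 : List Int) (nums2 : List Int) : Int :=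
  if nums1 = nums2 then 0
  else bfsA nums2 (Nat.factorial nums1.length + 1) [(nums1, 0)]
         (PySem.Set.add PySem.Set.empty nums1)

-- ===== PORT B =====
-- B's depth-limited DFS `within(state, k)`: target reachable from state in ≤ k moves;
-- the early `return True` inside the triple loop is `List.any` over the same move list.
def withinB (target : List Int) : Nat → List Int → Bool
  | 0, state => state == target
  | k + 1, state => state == target || (pvNbrs state).any (withinB target k)

-- B's deepening loop `for d in range(limit)`: r counts the remaining iterations.
def iddfsB (target start : List Int) : Nat → Nat → Int
  | 0, _ => -1
  | r + 1, d => if withinB target d start then (d : Int) else iddfsB target start r (d + 1)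

def minSplitMerge_alt (nums1 : List Int) (nums2 : List Int) : Int :=
  if PySem.List.sorted nums1 (fun x => x) false ≠ PySem.List.sorted nums2 (fun x => x) false then -1
  else
    -- limit = 1; for i in range(2, len(nums1)+1): limit *= i
    iddfsB nums2 nums1 ((List.range' 2 ((nums1.length + 1) - 2)).foldl (fun a i => a * i) 1) 0

-- ===== PRECONDITION & SPEC =====
def Spec_minSplitMerge (nums1 : List Int) (nums2 : List Int) (out : Int) : Prop := out = minSplitMerge_alt nums1 nums2
instance (nums1 : List Int) (nums2 : List Int) (out : Int) : Decidable (Spec_minSplitMerge nums1 nums2 out) := by unfold Spec_minSplitMerge; infer_instance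

-- ===== CLAIM (what is proved, stated in full; the proofs are below) =====
def Claim_equal_minSplitMerge : Prop := ∀ (nums1 : List Int) (nums2 : List Int), Dom_minSplitMerge nums1 nums2 → Spec_minSplitMerge nums1 nums2 (minSplitMerge nums1 nums2)

-- ===== LEMMAS AND PROOFS =====

lemma mem_pvNbrs_iff {s t : List Int} :
    t ∈ pvNbrs s ↔ ∃ u v w x y : List Int,
      v ≠ [] ∧ s = u ++ v ++ w ∧ u ++ w = x ++ y ∧ t = x ++ v ++ y := by
  simp only [pvNbrs, List.mem_flatMap, List.mem_map, List.mem_range, List.mem_range'_1]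
  constructor
  · rintro ⟨L, hL, R, ⟨hLR, hRn⟩, pos, hpos, rfl⟩
    have hsplit : s.drop L = (s.drop L).take (R + 1 - L) ++ s.drop (R + 1) := by
      conv_lhs => rw [← List.take_append_drop (R + 1 - L) (s.drop L)]
      rw [List.drop_drop]
      congr 2
      omega
    refine ⟨s.take L, (s.drop L).take (R + 1 - L), s.drop (R + 1),
      (s.take L ++ s.drop (R + 1)).take pos, (s.take L ++ s.drop (R + 1)).drop pos, ?_, ?_, ?_, rfl⟩
    · have hlen : ((s.drop L).take (R + 1 - L)).length = R + 1 - L := by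
        rw [List.length_take, List.length_drop]; omega
      intro h
      rw [h] at hlen
      simp at hlen
      omega
    · conv_lhs => rw [← List.take_append_drop L s, hsplit]
      rw [List.append_assoc]
    · exact (List.take_append_drop pos _).symm
  · rintro ⟨u, v, w, x, y, hv, rfl, hxy, rfl⟩
    have hv1 : 1 ≤ v.length := List.length_pos_of_ne_nil hv
    have htake : (u ++ v ++ w).take u.length = u := by
      rw [List.append_assoc, List.take_left]
    have hdrop : (u ++ v ++ w).drop (u.length + v.length - 1 + 1) = w := by
      have h2 : u.length + v.length - 1 + 1 = (u ++ v).length := by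
        simp [List.length_append]; omega
      rw [h2, List.drop_left]
    have hdropL : (u ++ v ++ w).drop u.length = v ++ w := by
      rw [List.append_assoc, List.drop_left]
    have hsub : ((u ++ v ++ w).drop u.length).take (u.length + v.length - 1 + 1 - u.length) = v := by
      rw [hdropL]
      have h3 : u.length + v.length - 1 + 1 - u.length = v.length := by omega
      rw [h3, List.take_left]
    refine ⟨u.length, ?_, u.length + v.length - 1, ⟨by omega, ?_⟩, x.length, ?_, ?_⟩
    · simp [List.length_append]; omega
    · simp [List.length_append]; omega
    · rw [htake, hdrop, hxy]
      simp [List.length_append]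
    · rw [htake, hdrop, hsub, hxy, List.take_left, List.drop_left]

lemma perm_of_mem_pvNbrs {s t : List Int} (h : t ∈ pvNbrs s) : t.Perm s := by
  rw [mem_pvNbrs_iff] at h
  obtain ⟨u, v, w, x, y, hv, hs, hxy, ht⟩ := h
  subst hs ht
  rw [List.perm_iff_count]
  intro a
  have hc := congrArg (List.count a) hxy
  simp only [List.count_append] at hc ⊢
  omega

def ReachN (src : List Int) : Nat → List Int → Prop
  | 0, t => t = src
  | k + 1, t => ∃ s, ReachN src k s ∧ t ∈ pvNbrs s

lemma reachN_perm {src : List Int} : ∀ {k t}, ReachN src k t → t.Perm src := by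
  intro k
  induction k with
  | zero => intro t h; rw [show ReachN src 0 t = (t = src) from rfl] at h; subst h; exact List.Perm.refl _
  | succ k ih =>
    rintro t ⟨s, hs, ht⟩
    exact (perm_of_mem_pvNbrs ht).trans (ih hs)

lemma reachN_step_front {a s u : List Int} (hs : s ∈ pvNbrs a) :
    ∀ {k}, ReachN s k u → ReachN a (k + 1) u := by
  intro k
  induction k generalizing u with
  | zero => intro h; rw [show ReachN s 0 u = (u = s) from rfl] at h; subst h; exact ⟨a, rfl, hs⟩
  | succ k ih =>
    rintro ⟨m, hm, hu⟩
    exact ⟨m, ih hm, hu⟩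

lemma reachN_front {a u : List Int} :
    ∀ {k}, ReachN a (k + 1) u → ∃ s ∈ pvNbrs a, ReachN s k u := by
  intro k
  induction k generalizing u with
  | zero =>
    rintro ⟨s, hs, hu⟩
    rw [show ReachN a 0 s = (s = a) from rfl] at hs
    subst hs
    exact ⟨u, hu, rfl⟩
  | succ k ih =>
    rintro ⟨m, hm, hu⟩
    obtain ⟨s, hs, hr⟩ := ih hm
    exact ⟨s, hs, m, hr, hu⟩

def Sph (src : List Int) (d : Nat) (t : List Int) : Prop :=
  ReachN src d t ∧ ∀ j < d, ¬ ReachN src j t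

def Ball (src : List Int) (d : Nat) (t : List Int) : Prop :=
  ∃ j ≤ d, ReachN src j t

lemma sph_succ_iff {src : List Int} {d : Nat} {t : List Int} :
    Sph src (d + 1) t ↔ (∃ s, Sph src d s ∧ t ∈ pvNbrs s) ∧ ¬ Ball src d t := by
  constructor
  · rintro ⟨⟨s, hs, ht⟩, hmin⟩
    refine ⟨⟨s, ⟨hs, fun j hj hr => hmin (j + 1) (by omega) ⟨s, hr, ht⟩⟩, ht⟩, ?_⟩
    · rintro ⟨j, hj, hr⟩
      exact hmin j (by omega) hr
  · rintro ⟨⟨s, ⟨hs, _⟩, ht⟩, hball⟩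
    exact ⟨⟨s, hs, ht⟩, fun j hj hr => hball ⟨j, by omega, hr⟩⟩

lemma ball_succ_iff {src : List Int} {d : Nat} {t : List Int} :
    Ball src (d + 1) t ↔ Ball src d t ∨ Sph src (d + 1) t := by
  constructor
  · rintro ⟨j, hj, hr⟩
    by_cases hb : Ball src d t
    · exact Or.inl hb
    · rcases Nat.lt_or_ge j (d + 1) with h | h
      · exact absurd ⟨j, by omega, hr⟩ hb
      · have : j = d + 1 := by omega
        subst this
        exact Or.inr ⟨hr, fun i hi hri => hb ⟨i, by omega, hri⟩⟩
  · rintro (⟨j, hj, hr⟩ | ⟨hr, _⟩)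
    · exact ⟨j, by omega, hr⟩
    · exact ⟨d + 1, le_refl _, hr⟩

lemma stab' {src : List Int} {e : Nat} (h : ∀ t, ¬ Sph src e t) :
    ∀ k t, ReachN src k t → ∃ j, j < e ∧ ReachN src j t := by
  have he : 1 ≤ e := by
    by_contra hc
    have : e = 0 := by omega
    subst this
    exact h src ⟨rfl, fun j hj => absurd hj (by omega)⟩
  intro k
  induction k with
  | zero => intro t ht; exact ⟨0, by omega, ht⟩
  | succ k ih =>
    rintro t ⟨s, hs, ht⟩
    obtain ⟨j, hj, hr⟩ := ih s hs
    rcases Nat.lt_or_ge (j + 1) e with h' | h'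
    · exact ⟨j + 1, h', ⟨s, hr, ht⟩⟩
    · have hje : j + 1 = e := by omega
      have hre : ReachN src e t := hje ▸ ⟨s, hr, ht⟩
      rcases Classical.em (∃ i, i < e ∧ ReachN src i t) with h'' | h''
      · exact h''
      · exact absurd ⟨hre, fun i hi hri => h'' ⟨i, hi, hri⟩⟩ (h t)

lemma sph_zero_iff {src t : List Int} : Sph src 0 t ↔ t = src := by
  constructor
  · rintro ⟨h, _⟩; exact h
  · rintro rfl; exact ⟨rfl, fun j hj => absurd hj (by omega)⟩

noncomputable def distAns (src tgt : List Int) : Int :=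
  haveI : Decidable (∃ k, ReachN src k tgt) := Classical.dec _
  if _h : ∃ k, ReachN src k tgt then ((sInf {k | ReachN src k tgt} : Nat) : Int) else -1

lemma distAns_eq {src tgt : List Int} {d : Nat} (hd : ReachN src d tgt)
    (hmin : ∀ j < d, ¬ ReachN src j tgt) : distAns src tgt = (d : Int) := by
  rw [distAns]
  rw [dif_pos ⟨d, hd⟩]
  congr 1
  refine le_antisymm (Nat.sInf_le hd) ?_
  by_contra hc
  push Not at hc
  exact hmin _ hc (Nat.sInf_mem (⟨d, hd⟩ : Set.Nonempty {k | ReachN src k tgt}))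

lemma distAns_none {src tgt : List Int} (h : ∀ k, ¬ ReachN src k tgt) : distAns src tgt = -1 := by
  rw [distAns]
  rw [dif_neg]
  rintro ⟨k, hk⟩
  exact h k hk

lemma foldA_spec (c : Int) :
    ∀ (L : List (List Int)) (acc : List (List Int × Int)) (vis : List (List Int)),
    ∃ news : List (List Int),
      L.foldl (fun (p : List (List Int × Int) × PySem.Set (List Int)) t =>
          if t ∈ p.2 then p else (p.1 ++ [(t, c)], PySem.Set.add p.2 t)) (acc, vis)
        = (acc ++ news.map (fun t => (t, c)), vis ++ news)
      ∧ news.Nodup ∧ (∀ x, x ∈ news ↔ x ∈ L ∧ x ∉ vis) := by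
  intro L
  induction L with
  | nil => intro acc vis; exact ⟨[], by simp, List.nodup_nil, by simp⟩
  | cons t ts ih =>
    intro acc vis
    by_cases ht : t ∈ vis
    · obtain ⟨news, heq, hnd, hmem⟩ := ih acc vis
      refine ⟨news, by simpa [ht] using heq, hnd, fun x => ?_⟩
      rw [hmem]
      constructor
      · rintro ⟨hx, hxv⟩; exact ⟨List.mem_cons_of_mem _ hx, hxv⟩
      · rintro ⟨hx, hxv⟩
        rcases List.mem_cons.1 hx with rfl | hx
        · exact absurd ht hxv
        · exact ⟨hx, hxv⟩
    · obtain ⟨news, heq, hnd, hmem⟩ := ih (acc ++ [(t, c)]) (vis ++ [t])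
      have hadd : PySem.Set.add vis t = vis ++ [t] := by
        simp [PySem.Set.add, PySem.Set.contains, ht]
      refine ⟨t :: news, ?_, ?_, fun x => ?_⟩
      · simpa [ht, hadd, List.append_assoc] using heq
      · refine List.nodup_cons.2 ⟨fun h => ?_, hnd⟩
        have := ((hmem t).1 h).2
        simp at this
      · constructor
        · rintro hx
          rcases List.mem_cons.1 hx with rfl | hx
          · exact ⟨List.mem_cons_self, ht⟩
          · obtain ⟨h1, h2⟩ := (hmem x).1 hx
            refine ⟨List.mem_cons_of_mem _ h1, fun hv => h2 ?_⟩
            simp [hv]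
        · rintro ⟨hx, hxv⟩
          rcases List.mem_cons.1 hx with rfl | hx
          · exact List.mem_cons_self
          · by_cases hxt : x = t
            · exact hxt ▸ List.mem_cons_self
            · refine List.mem_cons_of_mem _ ((hmem x).2 ⟨hx, ?_⟩)
              simp [hxv, hxt]

lemma vis_length_bound {src : List Int} {vis : List (List Int)} (hnd : vis.Nodup)
    (hp : ∀ x ∈ vis, x.Perm src) : vis.length ≤ Nat.factorial src.length := by
  have hsub : vis ⊆ src.permutations := fun x hx => List.mem_permutations.2 (hp x hx)
  have := (List.subperm_of_subset hnd hsub).length_le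
  rwa [List.length_permutations] at this

lemma ball_of_sph {src : List Int} {d : Nat} {x : List Int} (h : Sph src d x) : Ball src d x :=
  ⟨d, le_refl _, h.1⟩

lemma unreachable_of_exhausted {src tgt : List Int} {d : Nat} {P : List (List Int)}
    (hP : ∀ x, x ∈ P ↔ Sph src d x)
    (hnoNew : ∀ x, ¬ ((∃ s ∈ P, x ∈ pvNbrs s) ∧ ¬ Ball src d x))
    (hmin : ∀ j, j < d → ¬ ReachN src j tgt) (htgtP : tgt ∉ P) :
    ∀ k, ¬ ReachN src k tgt := by
  have hnoS : ∀ t, ¬ Sph src (d + 1) t := by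
    intro t hS
    rw [sph_succ_iff] at hS
    obtain ⟨⟨s, hs, hnb⟩, hb⟩ := hS
    exact hnoNew t ⟨⟨s, (hP s).2 hs, hnb⟩, hb⟩
  intro k hk
  obtain ⟨j, hj, hr⟩ := stab' hnoS k tgt hk
  rcases Nat.lt_or_ge j d with h | h
  · exact hmin j h hr
  · have hjd : j = d := by omega
    subst hjd
    exact htgtP ((hP tgt).2 ⟨hr, hmin⟩)

lemma bfsA_correct (src tgt : List Int) :
    ∀ (fuel : Nat) (d : Nat) (P cur next vis : List (List Int)),
    (P ++ cur ++ next).Nodup →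
    (∀ x, (x ∈ P ∨ x ∈ cur) ↔ Sph src d x) →
    (∀ x, x ∈ next ↔ (∃ s ∈ P, x ∈ pvNbrs s) ∧ ¬ Ball src d x) →
    (∀ x, x ∈ vis ↔ Ball src d x ∨ x ∈ next) →
    vis.Nodup →
    (∀ x ∈ vis, x.Perm src) →
    (∀ j, j < d → ¬ ReachN src j tgt) →
    tgt ∉ P →
    Nat.factorial src.length + (cur.length + next.length) ≤ fuel + vis.length →
    bfsA tgt fuel (cur.map (fun s => (s, (d : Int))) ++ next.map (fun s => (s, (d : Int) + 1))) vis
      = distAns src tgt := by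
  intro fuel
  induction fuel with
  | zero =>
    intro d P cur next vis hndq hcur hnext hvis hndv hperm hmin htgtP hfuel
    have hvb := vis_length_bound hndv hperm
    have hc0 : cur = [] := List.length_eq_zero_iff.1 (by omega)
    have hn0 : next = [] := List.length_eq_zero_iff.1 (by omega)
    subst hc0 hn0
    have hP : ∀ x, x ∈ P ↔ Sph src d x := fun x => by rw [← hcur x]; simp
    have hub := unreachable_of_exhausted hP
      (fun x hx => by have := (hnext x).2 hx; simp at this) hmin htgtP
    simp only [List.map_nil, List.append_nil]
    rw [distAns_none hub]
    rfl
  | succ fuel ih =>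
    intro d P cur next vis hndq hcur hnext hvis hndv hperm hmin htgtP hfuel
    have hmain : ∀ (d : Nat) (P : List (List Int)) (c : List Int) (cs next vis : List (List Int)),
        (P ++ (c :: cs) ++ next).Nodup →
        (∀ x, (x ∈ P ∨ x ∈ c :: cs) ↔ Sph src d x) →
        (∀ x, x ∈ next ↔ (∃ s ∈ P, x ∈ pvNbrs s) ∧ ¬ Ball src d x) →
        (∀ x, x ∈ vis ↔ Ball src d x ∨ x ∈ next) →
        vis.Nodup →
        (∀ x ∈ vis, x.Perm src) →
        (∀ j, j < d → ¬ ReachN src j tgt) →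
        tgt ∉ P →
        Nat.factorial src.length + ((c :: cs).length + next.length) ≤ (fuel + 1) + vis.length →
        bfsA tgt (fuel + 1) ((c :: cs).map (fun s => (s, (d : Int))) ++ next.map (fun s => (s, (d : Int) + 1))) vis
          = distAns src tgt := by
      intro d P c cs next vis hndq hcur hnext hvis hndv hperm hmin htgtP hfuel
      have hcS : Sph src d c := (hcur c).1 (Or.inr List.mem_cons_self)
      simp only [List.map_cons, List.cons_append]
      rw [bfsA]
      by_cases hct : c = tgt
      · rw [if_pos hct]
        subst hct
        exact (distAns_eq hcS.1 hmin).symm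
      · rw [if_neg hct]
        obtain ⟨news, heq, hndn, hmemn⟩ :=
          foldA_spec ((d : Int) + 1) (pvNbrs c)
            (cs.map (fun s => (s, (d : Int))) ++ next.map (fun s => (s, (d : Int) + 1))) vis
        simp only [heq]
        have hqueue : (cs.map (fun s => (s, (d : Int))) ++ next.map (fun s => (s, (d : Int) + 1)))
            ++ news.map (fun t => (t, (d : Int) + 1))
            = cs.map (fun s => (s, (d : Int))) ++ (next ++ news).map (fun s => (s, (d : Int) + 1)) := by
          rw [List.append_assoc, ← List.map_append]
        rw [hqueue]
        have hvis_of_ball : ∀ x, Ball src d x → x ∈ vis := fun x hx => (hvis x).2 (Or.inl hx)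
        have hvis_of_pc : ∀ x, (x ∈ P ∨ x ∈ c :: cs) → x ∈ vis :=
          fun x hx => hvis_of_ball x (ball_of_sph ((hcur x).1 hx))
        have hvis_of_next : ∀ x, x ∈ next → x ∈ vis := fun x hx => (hvis x).2 (Or.inr hx)
        have hnews_not_vis : ∀ x ∈ news, x ∉ vis := fun x hx => ((hmemn x).1 hx).2
        have hnews_nbr : ∀ x ∈ news, x ∈ pvNbrs c := fun x hx => ((hmemn x).1 hx).1
        have hnews_perm : ∀ x ∈ news, x.Perm src :=
          fun x hx => (perm_of_mem_pvNbrs (hnews_nbr x hx)).trans (reachN_perm hcS.1)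
        apply ih d (P ++ [c]) cs (next ++ news) (vis ++ news)
        · have hp : ((P ++ [c]) ++ cs ++ (next ++ news)).Perm ((P ++ (c :: cs) ++ next) ++ news) := by
            rw [List.perm_iff_count]
            intro a
            simp only [List.count_append, List.count_cons, List.count_nil]
            omega
          rw [hp.nodup_iff]
          refine hndq.append hndn (fun x hx => ?_)
          intro hxn
          apply hnews_not_vis x hxn
          simp only [List.mem_append, List.mem_cons] at hx
          rcases hx with (hx | hx) | hx
          · exact hvis_of_pc x (Or.inl hx)
          · exact hvis_of_pc x (Or.inr (by simp [hx]))
          · exact hvis_of_next x hx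
        · intro x
          rw [← hcur x]
          simp only [List.mem_append, List.mem_cons]
          tauto
        · intro x
          simp only [List.mem_append, List.mem_singleton]
          constructor
          · rintro (hx | hx)
            · obtain ⟨⟨s, hs, hnb⟩, hb⟩ := (hnext x).1 hx
              exact ⟨⟨s, Or.inl hs, hnb⟩, hb⟩
            · obtain ⟨hnb, hnv⟩ := (hmemn x).1 hx
              refine ⟨⟨c, Or.inr rfl, hnb⟩, fun hb => hnv (hvis_of_ball x hb)⟩
          · rintro ⟨⟨s, hs, hnb⟩, hb⟩
            rcases hs with hs | rfl
            · exact Or.inl ((hnext x).2 ⟨⟨s, hs, hnb⟩, hb⟩)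
            ·
              by_cases hxv : x ∈ vis
              · rcases (hvis x).1 hxv with hb' | hx
                · exact absurd hb' hb
                · exact Or.inl hx
              · exact Or.inr ((hmemn x).2 ⟨hnb, hxv⟩)
        · intro x
          simp only [List.mem_append]
          rw [hvis x]
          tauto
        · exact hndv.append hndn (fun x hxv hxn => hnews_not_vis x hxn hxv)
        · intro x hx
          rcases List.mem_append.1 hx with hx | hx
          · exact hperm x hx
          · exact hnews_perm x hx
        · exact hmin
        · intro hx
          rcases List.mem_append.1 hx with hx | hx
          · exact htgtP hx
          · exact hct (List.mem_singleton.1 hx).symm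
        · simp only [List.length_append, List.length_cons] at hfuel ⊢
          omega
    rcases cur with _ | ⟨c, cs⟩
    · have hP : ∀ x, x ∈ P ↔ Sph src d x := fun x => by rw [← hcur x]; simp
      rcases next with _ | ⟨n, ns⟩
      · have hub := unreachable_of_exhausted hP
          (fun x hx => by have := (hnext x).2 hx; simp at this) hmin htgtP
        simp only [List.map_nil, List.append_nil]
        rw [distAns_none hub]
        rfl
      · have hcast : ((d : Int) + 1) = ((d + 1 : Nat) : Int) := by push_cast; ring
        have hsph : ∀ x, x ∈ n :: ns ↔ Sph src (d + 1) x := by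
          intro x
          rw [sph_succ_iff]
          constructor
          · intro hx
            obtain ⟨⟨s, hs, hnb⟩, hb⟩ := (hnext x).1 hx
            exact ⟨⟨s, (hP s).1 hs, hnb⟩, hb⟩
          · rintro ⟨⟨s, hs, hnb⟩, hb⟩
            exact (hnext x).2 ⟨⟨s, (hP s).2 hs, hnb⟩, hb⟩
        have hmin' : ∀ j, j < d + 1 → ¬ ReachN src j tgt := by
          intro j hj hr
          rcases Nat.lt_or_ge j d with h | h
          · exact hmin j h hr
          · have : j = d := by omega
            subst this
            exact htgtP ((hP tgt).2 ⟨hr, hmin⟩)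
        have happ := hmain (d + 1) [] n ns [] vis ?_ ?_ ?_ ?_ hndv hperm hmin' (by simp) ?_
        · simp only [List.map_nil, List.append_nil, List.nil_append] at happ ⊢
          rw [hcast]
          exact happ
        · simp only [List.nil_append, List.append_nil]
          have := hndq.of_append_right
          simpa using this
        · intro x
          rw [← hsph x]
          simp
        · intro x
          simp
        · intro x
          rw [hvis x, ball_succ_iff, ← hsph x]
          simp
        · simp only [List.length_nil, List.length_cons] at hfuel ⊢
          omega
    · exact hmain d P c cs next vis hndq hcur hnext hvis hndv hperm hmin htgtP hfuel

lemma ball_zero_iff {src x : List Int} : Ball src 0 x ↔ x = src := by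
  constructor
  · rintro ⟨j, hj, hr⟩
    have : j = 0 := by omega
    subst this
    exact hr
  · rintro rfl
    exact ⟨0, le_refl _, rfl⟩

lemma distAns_self (src : List Int) : distAns src src = 0 := by
  have := distAns_eq (src := src) (tgt := src) (d := 0) rfl (fun j hj => absurd hj (by omega))
  simpa using this

lemma minSplitMerge_eq_distAns (nums1 nums2 : List Int) :
    minSplitMerge nums1 nums2 = distAns nums1 nums2 := by
  rw [minSplitMerge]
  by_cases h : nums1 = nums2
  · rw [if_pos h, h, distAns_self]
  · rw [if_neg h]
    have hvis : PySem.Set.add PySem.Set.empty nums1 = [nums1] := rfl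
    rw [hvis]
    have := bfsA_correct nums1 nums2 (Nat.factorial nums1.length + 1) 0 [] [nums1] [] [nums1]
      (by simp) ?_ (by simp) ?_ (by simp) (by simp) (fun j hj => absurd hj (by omega)) (by simp) (by simp)
    · simpa using this
    · intro x
      rw [sph_zero_iff]
      simp
    · intro x
      rw [ball_zero_iff]
      simp

-- ===== B-side lemmas =====

lemma withinB_iff (target : List Int) :
    ∀ (k : Nat) (s : List Int), withinB target k s = true ↔ Ball s k target := by
  intro k
  induction k with
  | zero =>
    intro s
    rw [withinB, ball_zero_iff]
    exact ⟨fun h => (beq_iff_eq.1 h).symm, fun h => beq_iff_eq.2 h.symm⟩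
  | succ k ih =>
    intro s
    rw [withinB]
    simp only [Bool.or_eq_true, beq_iff_eq, List.any_eq_true]
    constructor
    · rintro (rfl | ⟨t, ht, hw⟩)
      · exact ⟨0, by omega, rfl⟩
      · obtain ⟨j, hj, hr⟩ := (ih t).1 hw
        exact ⟨j + 1, by omega, reachN_step_front ht hr⟩
    · rintro ⟨j, hj, hr⟩
      rcases j with _ | i
      · exact Or.inl hr.symm
      · obtain ⟨t, ht, hr'⟩ := reachN_front hr
        exact Or.inr ⟨t, ht, (ih t).2 ⟨i, by omega, hr'⟩⟩

lemma sph_chain {start : List Int} :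
    ∀ (m : Nat) (t : List Int), ReachN start m t → (∀ j < m, ¬ ReachN start j t) →
    ∀ j ≤ m, ∃ x, Sph start j x := by
  intro m
  induction m with
  | zero =>
    intro t _ _ j hj
    have : j = 0 := by omega
    subst this
    exact ⟨start, sph_zero_iff.2 rfl⟩
  | succ m ih =>
    rintro t ⟨s, hs, ht⟩ hmin j hj
    have hmins : ∀ i < m, ¬ ReachN start i s := by
      intro i hi hri
      exact hmin (i + 1) (by omega) ⟨s, hri, ht⟩
    rcases Nat.lt_or_ge j (m + 1) with h | h
    · exact ih s hs hmins j (by omega)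
    · have : j = m + 1 := by omega
      subst this
      exact ⟨t, ⟨⟨s, hs, ht⟩, hmin⟩⟩

lemma sph_depth_unique {start x : List Int} {i j : Nat}
    (hi : Sph start i x) (hj : Sph start j x) : i = j := by
  rcases Nat.lt_trichotomy i j with h | h | h
  · exact absurd hi.1 (hj.2 i h)
  · exact h
  · exact absurd hj.1 (hi.2 j h)

lemma reach_lt_fact {start tgt : List Int} {k : Nat} (hk : ReachN start k tgt) :
    ∃ j, j < Nat.factorial start.length ∧ ReachN start j tgt := by
  have hne : Set.Nonempty {n | ReachN start n tgt} := ⟨k, hk⟩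
  set m := sInf {n | ReachN start n tgt} with hm
  have hrm : ReachN start m tgt := Nat.sInf_mem hne
  have hmin : ∀ j < m, ¬ ReachN start j tgt := fun j hj => Nat.notMem_of_lt_sInf hj
  have hchain := sph_chain m tgt hrm hmin
  have hch : ∀ j ≤ m, ∃ x, Sph start j x := hchain
  -- pick a representative of each sphere 0..m and count
  classical
  let f : Nat → List Int := fun j => if h : ∃ x, Sph start j x then Classical.choose h else []
  have hf : ∀ j ≤ m, Sph start j (f j) := by
    intro j hj
    have h := hch j hj
    simp only [f, dif_pos h]
    exact Classical.choose_spec h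
  have hnd : ((List.range (m + 1)).map f).Nodup := by
    refine (List.nodup_range).map_on ?_
    intro i hi j hj hij
    have hi' : Sph start i (f i) := hf i (by simpa [Nat.lt_succ_iff] using hi)
    have hj' : Sph start j (f j) := hf j (by simpa [Nat.lt_succ_iff] using hj)
    exact sph_depth_unique hi' (hij ▸ hj')
  have hperm : ∀ x ∈ (List.range (m + 1)).map f, x.Perm start := by
    intro x hx
    obtain ⟨j, hj, rfl⟩ := List.mem_map.1 hx
    exact reachN_perm (hf j (by simpa [Nat.lt_succ_iff] using List.mem_range.1 hj)).1
  have hlen := vis_length_bound hnd hperm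
  simp only [List.length_map, List.length_range] at hlen
  exact ⟨m, by omega, hrm⟩

lemma iddfsB_correct (start target : List Int) :
    ∀ (r d : Nat),
    (∀ j < d, ¬ ReachN start j target) →
    Nat.factorial start.length ≤ r + d →
    iddfsB target start r d = distAns start target := by
  intro r
  induction r with
  | zero =>
    intro d hmin hfuel
    rw [iddfsB]
    refine (distAns_none (fun k hk => ?_)).symm
    obtain ⟨j, hj, hr⟩ := reach_lt_fact hk
    exact hmin j (by omega) hr
  | succ r ih =>
    intro d hmin hfuel
    rw [iddfsB]
    by_cases hw : withinB target d start = true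
    · rw [if_pos hw]
      obtain ⟨j, hj, hr⟩ := (withinB_iff target d start).1 hw
      have : j = d := by
        rcases Nat.lt_or_ge j d with h | h
        · exact absurd hr (hmin j h)
        · omega
      subst this
      exact (distAns_eq hr hmin).symm
    · rw [if_neg hw]
      apply ih (d + 1)
      · intro j hj hr
        rcases Nat.lt_or_ge j d with h | h
        · exact hmin j h hr
        · exact hw ((withinB_iff target d start).2 ⟨j, by omega, hr⟩)
      · omega

lemma prodRange_eq_fact : ∀ m : Nat,
    (List.range' 2 m).foldl (fun a i => a * i) 1 = Nat.factorial (m + 1) := by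
  intro m
  induction m with
  | zero => rfl
  | succ m ih =>
    rw [List.range'_concat, List.foldl_append, ih]
    simp [Nat.factorial_succ]
    ring

lemma limit_eq_fact (n : Nat) :
    (List.range' 2 ((n + 1) - 2)).foldl (fun a i => a * i) 1 = Nat.factorial n := by
  rcases n with _ | n
  · rfl
  · have : (n + 1 + 1) - 2 = n := by omega
    rw [this, prodRange_eq_fact]

lemma minSplitMerge_alt_eq_distAns (nums1 nums2 : List Int) :
    minSplitMerge_alt nums1 nums2 = distAns nums1 nums2 := by
  rw [minSplitMerge_alt]
  by_cases hs : PySem.List.sorted nums1 (fun x => x) false = PySem.List.sorted nums2 (fun x => x) false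
  case neg =>
    rw [if_pos hs]
    refine (distAns_none (fun k hk => ?_)).symm
    exact hs (((PySem.List.sorted_id_eq_sorted_id_iff_perm nums1 nums2).2 (reachN_perm hk).symm))
  rw [if_neg (by simpa using hs), limit_eq_fact]
  exact iddfsB_correct nums1 nums2 (Nat.factorial nums1.length) 0
    (fun j hj => absurd hj (by omega)) (by omega)

-- ===== VERDICT (by name: the statement is the Claim_ definition above) =====
theorem minSplitMerge_spec : Claim_equal_minSplitMerge := by
  intro nums1 nums2 _
  unfold Spec_minSplitMerge
  rw [minSplitMerge_eq_distAns, minSplitMerge_alt_eq_distAns]
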